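-- pv_equiv track=rewrite | github.com/PM25/Medical-Question-Answering-and-Decision-Making-AIdea-Competition | dataset.py | diag_prune
-- ===== SOURCE A (Python) =====
-- def count_word(diag):
--     count = 0
--     for i in range(len(diag)):
--         spkr, sent = diag[i]
--         count += (len(spkr) + len(sent) + 1)
--     return count
--
-- def diag_prune(diag_subset, thr):
--     if len(diag_subset) > 1 and count_word(diag_subset) > thr:
--         diag_subset_prune = []
--         count = 0
--         for d in diag_subset:
--             spkr, sent = d
--             count += (len(spkr) + len(sent) + 1)
--             if count < 470:
--                 diag_subset_prune.append(d)
--             else: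
--                 diag_subset = diag_subset_prune
--                 break
--     elif len(diag_subset) == 1 and count_word(diag_subset) > thr:
--         spkr, sent = diag_subset[0]
--         sent = sent[:thr-2]
--         diag_subset[0] = spkr, sent
--     return diag_subset
-- ===== SOURCE B (Python) =====
-- def diag_prune(diag_subset, thr):
--     # prefix sums of per-turn weights, then binary search for the 470 cutoff
--     pre = []
--     total = 0
--     for spkr, sent in diag_subset:
--         total += len(spkr) + len(sent) + 1
--         pre.append(total)
--     if len(diag_subset) > 1 and total > thr:
--         lo, hi = 0, len(pre)
--         while lo < hi:  # first index with pre[mid] >= 470 (pre is strictly increasing)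
--             mid = (lo + hi) // 2
--             if pre[mid] < 470:
--                 lo = mid + 1
--             else:
--                 hi = mid
--         if lo < len(pre):
--             return diag_subset[:lo]
--         return diag_subset
--     if len(diag_subset) == 1 and total > thr:
--         spkr, sent = diag_subset[0]
--         diag_subset[0] = (spkr, sent[:thr - 2])
--     return diag_subset
-- ===== Notes on version B (the rewrite author's own statement) =====
-- stated objective: alternative
-- what changed: B precomputes the prefix sums of per-turn weights in one pass and locates the 470 cutoff by binary search over the (strictly increasing) prefix sums, then slices, instead of A's fused append-and-break loop; the total also replaces the separate count_word pass.
import Mathlib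
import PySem

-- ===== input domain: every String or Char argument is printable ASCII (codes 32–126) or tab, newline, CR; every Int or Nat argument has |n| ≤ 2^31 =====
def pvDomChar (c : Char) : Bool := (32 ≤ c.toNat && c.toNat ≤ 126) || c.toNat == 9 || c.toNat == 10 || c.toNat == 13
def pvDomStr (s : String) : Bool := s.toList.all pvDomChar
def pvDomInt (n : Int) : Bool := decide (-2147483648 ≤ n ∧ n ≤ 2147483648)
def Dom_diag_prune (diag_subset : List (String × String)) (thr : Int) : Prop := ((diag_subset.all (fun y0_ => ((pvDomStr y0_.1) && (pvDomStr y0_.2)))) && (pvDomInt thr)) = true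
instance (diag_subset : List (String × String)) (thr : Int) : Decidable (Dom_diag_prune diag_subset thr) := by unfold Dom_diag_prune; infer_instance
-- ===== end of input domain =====

-- B replaces A's fused append-and-break loop by prefix sums plus a binary search for the 470
-- cutoff (objective: alternative decomposition, same asymptotic cost). Equivalence is about the
-- return value; in the len==1 branch both A and B perform the same in-place update of element 0.

-- ===== PORT A =====
-- count = 0; for i in range(len(diag)): spkr, sent = diag[i]; count += len(spkr)+len(sent)+1
def count_word (diag : List (String × String)) : Int :=
  (PySem.List.pyRange 0 (PySem.List.len diag)).foldl
    (fun count i =>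
      let d := PySem.List.pyGetD diag i ("", "")   -- diag[i]; i ∈ range(len) is always in range
      count + (PySem.Str.len d.1 + PySem.Str.len d.2 + 1)) 0

-- the for-loop of A's len>1 branch: append while cumulative count < 470, else break with the
-- pruned prefix; falling off the end returns the original list unchanged
def pruneLoopA : List (String × String) → List (String × String) → Int → List (String × String) → List (String × String)
  | [], _, _, orig => orig
  | d :: rest, acc, count, orig =>
    let c := count + (PySem.Str.len d.1 + PySem.Str.len d.2 + 1)
    if c < 470 then pruneLoopA rest (acc ++ [d]) c orig
    else acc

def diag_prune (diag_subset : List (String × String)) (thr : Int) : List (String × String) :=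
  if diag_subset.length > 1 ∧ count_word diag_subset > thr then
    pruneLoopA diag_subset [] 0 diag_subset
  else if diag_subset.length = 1 ∧ count_word diag_subset > thr then
    match diag_subset with
    | (spkr, sent) :: rest => (spkr, PySem.Str.slice sent none (some (thr - 2))) :: rest  -- diag_subset[0] = spkr, sent[:thr-2]
    | [] => diag_subset  -- unreachable under the length = 1 guard
  else diag_subset

-- ===== PORT B =====
-- while lo < hi: mid = (lo+hi)//2; if pre[mid] < 470: lo = mid+1 else: hi = mid
def bsearchB (pre : List Int) (lo hi : Nat) : Nat :=
  if h : lo < hi then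
    let mid := (lo + hi) / 2
    if pre.getD mid 0 < 470 then bsearchB pre (mid + 1) hi   -- pre[mid]; mid < hi ≤ len(pre) is always in range
    else bsearchB pre lo mid
  else lo
termination_by hi - lo
decreasing_by all_goals omega

def diag_prune_alt (diag_subset : List (String × String)) (thr : Int) : List (String × String) :=
  -- one pass building the prefix sums pre and the running total
  let pt := diag_subset.foldl
    (fun (pt : List Int × Int) d =>
      let t := pt.2 + (PySem.Str.len d.1 + PySem.Str.len d.2 + 1)
      (pt.1 ++ [t], t)) ([], 0)
  let pre := pt.1
  let total := pt.2
  if diag_subset.length > 1 ∧ total > thr then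
    let lo := bsearchB pre 0 pre.length
    if lo < pre.length then PySem.List.slice diag_subset none (some (lo : Int))  -- diag_subset[:lo]
    else diag_subset
  else if diag_subset.length = 1 ∧ total > thr then
    match diag_subset with
    | (spkr, sent) :: rest => (spkr, PySem.Str.slice sent none (some (thr - 2))) :: rest  -- diag_subset[0] = spkr, sent[:thr-2]
    | [] => diag_subset
  else diag_subset

-- ===== PRECONDITION & SPEC =====
def Spec_diag_prune (diag_subset : List (String × String)) (thr : Int) (out : List (String × String)) : Prop := out = diag_prune_alt diag_subset thr
instance (diag_subset : List (String × String)) (thr : Int) (out : List (String × String)) : Decidable (Spec_diag_prune diag_subset thr out) := by unfold Spec_diag_prune; infer_instance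

-- ===== CLAIM (what is proved, stated in full; the proofs are below) =====
def Claim_equal_diag_prune : Prop := ∀ (diag_subset : List (String × String)) (thr : Int), Dom_diag_prune diag_subset thr → Spec_diag_prune diag_subset thr (diag_prune diag_subset thr)

-- ===== LEMMAS AND PROOFS =====

-- per-turn weight
def wOf (d : String × String) : Int := PySem.Str.len d.1 + PySem.Str.len d.2 + 1

lemma wOf_pos (d : String × String) : 0 < wOf d := by
  simp only [wOf, PySem.Str.len_eq]; omega

-- prefix sums of wOf starting from c (spec for B's fold)
def preOf : List (String × String) → Int → List Int
  | [], _ => []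
  | d :: r, c => (c + wOf d) :: preOf r (c + wOf d)

def sumW (ds : List (String × String)) : Int := (ds.map wOf).sum

-- the cutoff index A's loop realizes: first index whose cumulative sum from c reaches 470,
-- or the length if none does
def cutIdx : List (String × String) → Int → Nat
  | [], _ => 0
  | d :: r, c => if c + wOf d < 470 then cutIdx r (c + wOf d) + 1 else 0

lemma count_word_eq (ds : List (String × String)) : count_word ds = sumW ds := by
  unfold count_word
  rw [PySem.List.foldl_pyRange_zero_pyGetD ds ("", "")
      (fun count d => count + (PySem.Str.len d.1 + PySem.Str.len d.2 + 1)) 0]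
  induction ds with
  | nil => simp [sumW]
  | cons d r ih =>
    simp only [List.foldl_cons, sumW, List.map_cons, List.sum_cons] at *
    rw [PySem.List.foldl_add]
    rw [PySem.List.foldl_add] at ih
    simp only [wOf]; omega

lemma foldB (ds : List (String × String)) :
    ∀ (acc : List Int) (c : Int),
      ds.foldl (fun (pt : List Int × Int) d =>
        let t := pt.2 + (PySem.Str.len d.1 + PySem.Str.len d.2 + 1)
        (pt.1 ++ [t], t)) (acc, c) = (acc ++ preOf ds c, c + sumW ds) := by
  induction ds with
  | nil => intro acc c; simp [preOf, sumW]
  | cons d r ih =>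
    intro acc c
    simp only [List.foldl_cons, preOf]
    rw [ih]
    simp [sumW, wOf, List.append_assoc]
    omega

lemma preOf_length (ds : List (String × String)) (c : Int) : (preOf ds c).length = ds.length := by
  induction ds generalizing c with
  | nil => rfl
  | cons d r ih => simp [preOf, ih]

lemma le_preOf (ds : List (String × String)) (c : Int) : ∀ x ∈ preOf ds c, c ≤ x := by
  induction ds generalizing c with
  | nil => simp [preOf]
  | cons d r ih =>
    intro x hx
    have hw := wOf_pos d
    simp only [preOf, List.mem_cons] at hx
    rcases hx with h | h
    · omega
    · have := ih (c + wOf d) x h; omega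

lemma preOf_mono (ds : List (String × String)) (c : Int) :
    ∀ i j : Nat, i ≤ j → j < ds.length →
      (preOf ds c).getD i 0 ≤ (preOf ds c).getD j 0 := by
  induction ds generalizing c with
  | nil => intro i j _ hj; simp at hj
  | cons d r ih =>
    intro i j hij hj
    cases i with
    | zero =>
      cases j with
      | zero => exact le_refl _
      | succ j' =>
        simp only [preOf, List.getD_cons_zero, List.getD_cons_succ]
        have hj' : j' < r.length := by simpa using hj
        have hj'' : j' < (preOf r (c + wOf d)).length := by rw [preOf_length]; exact hj'
        rw [List.getD_eq_getElem _ 0 hj'']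
        exact le_preOf r (c + wOf d) _ (List.getElem_mem hj'')
    | succ i' =>
      cases j with
      | zero => omega
      | succ j' =>
        simp only [preOf, List.getD_cons_succ]
        exact ih (c + wOf d) i' j' (by omega) (by simpa using hj)

-- cutIdx is the first index of preOf reaching 470 (length if none)
lemma cutIdx_eq_findIdx (ds : List (String × String)) (c : Int) :
    cutIdx ds c = (preOf ds c).findIdx (fun x => decide (470 ≤ x)) := by
  induction ds generalizing c with
  | nil => simp [cutIdx, preOf]
  | cons d r ih =>
    by_cases h : c + wOf d < 470
    · have hd : decide ((470 : Int) ≤ c + wOf d) = false := by simp; omega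
      simp [cutIdx, preOf, List.findIdx_cons, h, hd, ih]
    · have hd : decide ((470 : Int) ≤ c + wOf d) = true := by simp; omega
      simp [cutIdx, preOf, List.findIdx_cons, h, hd]

-- A's loop returns acc ++ the pruned prefix when the cutoff is hit, else the original list
lemma pruneLoopA_eq (ds : List (String × String)) :
    ∀ (acc : List (String × String)) (c : Int) (orig : List (String × String)),
      pruneLoopA ds acc c orig =
        if cutIdx ds c < ds.length then acc ++ ds.take (cutIdx ds c) else orig := by
  induction ds with
  | nil => intro acc c orig; simp [pruneLoopA, cutIdx]
  | cons d r ih =>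
    intro acc c orig
    simp only [pruneLoopA, cutIdx, List.length_cons]
    by_cases h : c + wOf d < 470
    · have hh : c + (PySem.Str.len d.1 + PySem.Str.len d.2 + 1) < 470 := by
        simpa [wOf] using h
      rw [if_pos hh, ih (acc ++ [d]) (c + (PySem.Str.len d.1 + PySem.Str.len d.2 + 1)) orig,
          if_pos h]
      have hc : c + (PySem.Str.len d.1 + PySem.Str.len d.2 + 1) = c + wOf d := by
        simp [wOf]
      rw [hc]
      by_cases hlt : cutIdx r (c + wOf d) < r.length
      · rw [if_pos hlt, if_pos (by omega)]
        simp [List.take_succ_cons]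
      · rw [if_neg hlt, if_neg (by omega)]
    · have hh : ¬ (c + (PySem.Str.len d.1 + PySem.Str.len d.2 + 1) < 470) := by
        simpa [wOf] using h
      rw [if_neg hh, if_neg h, if_pos (by omega)]
      simp

-- binary search over a monotone list computes findIdx of (470 ≤ ·)
theorem bsearchB_eq (pre : List Int)
    (mono : ∀ i j : Nat, i ≤ j → j < pre.length → pre.getD i 0 ≤ pre.getD j 0)
    (lo hi : Nat) (h1 : lo ≤ hi) (h2 : hi ≤ pre.length)
    (hlo : ∀ i, i < lo → pre.getD i 0 < 470)
    (hhi : ∀ i, hi ≤ i → i < pre.length → 470 ≤ pre.getD i 0) :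
    bsearchB pre lo hi = pre.findIdx (fun x => decide (470 ≤ x)) := by
  rw [bsearchB]
  by_cases h : lo < hi
  · rw [dif_pos h]
    set mid := (lo + hi) / 2 with hmid
    have hm1 : lo ≤ mid := by omega
    have hm2 : mid < hi := by omega
    by_cases hv : pre.getD mid 0 < 470
    · rw [if_pos hv]
      exact bsearchB_eq pre mono (mid + 1) hi (by omega) h2
        (fun i hi' => by
          by_cases hc : i < lo
          · exact hlo i hc
          · have : pre.getD i 0 ≤ pre.getD mid 0 :=
              mono i mid (by omega) (by omega)
            omega)
        hhi
    · rw [if_neg hv]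
      exact bsearchB_eq pre mono lo mid (by omega) (by omega) hlo
        (fun i hi' hlen => le_trans (by omega) (mono mid i hi' hlen))
  · rw [dif_neg h]
    have hlh : lo = hi := by omega
    have hNle : pre.findIdx (fun x => decide (470 ≤ x)) ≤ pre.length := List.findIdx_le_length
    -- lo ≤ findIdx : every index below lo fails the predicate
    have hloN : lo ≤ pre.findIdx (fun x => decide (470 ≤ x)) := by
      by_contra hc
      have hNlt : pre.findIdx (fun x => decide (470 ≤ x)) < pre.length := by omega
      have hsat := List.findIdx_getElem (w := hNlt) (p := fun x => decide (470 ≤ x)) (xs := pre)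
      have hfail := hlo (pre.findIdx (fun x => decide (470 ≤ x))) (by omega)
      rw [List.getD_eq_getElem pre 0 hNlt] at hfail
      simp only [decide_eq_true_eq] at hsat
      omega
    -- findIdx ≤ lo : if lo < pre.length then pre[lo] satisfies the predicate, so findIdx ≤ lo
    have hNlo : pre.findIdx (fun x => decide (470 ≤ x)) ≤ lo := by
      by_cases hll : lo < pre.length
      · by_contra hc
        have hf := List.not_of_lt_findIdx (p := fun x => decide (470 ≤ x)) (xs := pre)
          (i := lo) (by omega)
        have hsat := hhi lo (by omega) hll
        rw [List.getD_eq_getElem pre 0 hll] at hsat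
        simp only [decide_eq_false_iff_not, not_le] at hf
        omega
      · omega
    omega
termination_by hi - lo
decreasing_by all_goals omega

lemma branch1_eq (ds : List (String × String)) :
    (if (bsearchB (preOf ds 0) 0 (preOf ds 0).length) < (preOf ds 0).length
       then PySem.List.slice ds none (some ((bsearchB (preOf ds 0) 0 (preOf ds 0).length : Nat) : Int))
       else ds)
      = pruneLoopA ds [] 0 ds := by
  have hb : bsearchB (preOf ds 0) 0 (preOf ds 0).length = cutIdx ds 0 := by
    rw [bsearchB_eq (preOf ds 0)
        (fun i j hij hj => preOf_mono ds 0 i j hij (by rwa [preOf_length] at hj))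
        0 (preOf ds 0).length
        (Nat.zero_le _) (le_refl _) (fun i hi => by omega) (fun i hi hlen => by omega)]
    exact (cutIdx_eq_findIdx ds 0).symm
  rw [hb, pruneLoopA_eq ds [] 0 ds, preOf_length]
  by_cases h : cutIdx ds 0 < ds.length
  · rw [if_pos h, if_pos h, PySem.List.slice_to_natCast]
    simp
  · rw [if_neg h, if_neg h]

-- ===== VERDICT (by name: the statement is the Claim_ definition above) =====
theorem diag_prune_spec : Claim_equal_diag_prune := by
  intro ds thr _
  unfold Spec_diag_prune diag_prune diag_prune_alt
  have hfold := foldB ds [] 0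
  rw [hfold]
  simp only [List.nil_append, Int.zero_add]
  rw [← count_word_eq]
  by_cases h1 : ds.length > 1 ∧ count_word ds > thr
  · rw [if_pos h1, if_pos h1]
    exact (branch1_eq ds).symm
  · rw [if_neg h1, if_neg h1]
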